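-- pv_equiv track=rewrite | github.com/5-million/solve-algorithm | baekjoon/구현/17140-이차원_배열과_연산_v1.py | excute
-- ===== SOURCE A (Python) =====
-- from collections import Counter
--
-- def excute(arr):
--     temp = []
--     max_len = 0
--     for i, row in enumerate(arr):
--         temp.append([])
--         counter = sorted(Counter(row).items(), key = lambda x: (x[1], x[0]))
--
--         for count in counter:
--             if count[0] == 0:
--                 continue
--
--             temp[i] += [count[0], count[1]]
--             max_len = max(max_len, len(temp[i]))
--
--     for i in range(len(temp)):
--         temp[i] += [0] * (max_len - len(temp[i]))
--
--         if len(temp[i]) > 100: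
--             temp[i] = temp[i][:100]
--
--     return temp
-- ===== SOURCE B (Python) =====
-- def excute(arr):
--     rows = []
--     for row in arr:
--         counts = {}
--         for v in row:
--             if v != 0:
--                 counts[v] = counts.get(v, 0) + 1
--         pairs = list(counts.items())
--         flat = []
--         while pairs:
--             m = 0
--             for j in range(1, len(pairs)):
--                 if (pairs[j][1], pairs[j][0]) < (pairs[m][1], pairs[m][0]):
--                     m = j
--             v, c = pairs.pop(m)
--             flat += [v, c]
--         rows.append(flat)
--     width = min(max(map(len, rows), default=0), 100)
--     return [(r + [0] * (width - len(r)))[:width] for r in rows]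
-- ===== Notes on version B (the rewrite author's own statement) =====
-- stated objective: alternative
-- what changed: B never sorts: per row it counts nonzero values with an explicit dict loop and then builds the output by repeated minimum-extraction (selection) of the lexicographically least (count, value) pair from the pair list, popping it and flattening as it goes; width computation and zero-padding/truncation happen in one separate final pass.
import Mathlib
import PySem

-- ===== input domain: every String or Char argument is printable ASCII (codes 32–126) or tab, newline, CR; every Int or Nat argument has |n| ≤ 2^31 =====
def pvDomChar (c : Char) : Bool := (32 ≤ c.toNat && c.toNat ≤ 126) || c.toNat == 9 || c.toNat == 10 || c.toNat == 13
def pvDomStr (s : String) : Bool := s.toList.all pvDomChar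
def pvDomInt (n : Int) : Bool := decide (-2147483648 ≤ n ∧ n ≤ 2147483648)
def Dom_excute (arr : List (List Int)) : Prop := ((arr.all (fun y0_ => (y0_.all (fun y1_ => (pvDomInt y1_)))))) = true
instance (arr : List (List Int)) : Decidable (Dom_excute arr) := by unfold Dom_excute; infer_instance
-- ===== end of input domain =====

-- B never sorts: it counts nonzero values with an explicit dict loop and builds each row by
-- repeated minimum-extraction (selection) of the least (count, value) pair, padding in a
-- separate final pass (objective: alternative).

-- ===== PORT A =====
-- body of A's inner loop over the sorted counter items ('if count[0] == 0: continue; temp[i] += ...; max_len = max(...)')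
def AinnerStep (rm : List Int × Nat) (c : Int × Int) : List Int × Nat :=
  if c.1 == 0 then rm else (rm.1 ++ [c.1, c.2], max rm.2 (rm.1 ++ [c.1, c.2]).length)

-- body of A's outer loop over the rows
def AStep (acc : List (List Int) × Nat) (row : List Int) : List (List Int) × Nat :=
  let counter := PySem.List.sorted2 (PySem.Dict.counter row).items (fun x => x.2) (fun x => x.1)
  let rm := counter.foldl AinnerStep ([], acc.2)
  (acc.1 ++ [rm.1], rm.2)

def excute (arr : List (List Int)) : List (List Int) :=
  let st := arr.foldl AStep ([], 0)
  st.1.map (fun t =>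
    let t' := t ++ List.replicate (st.2 - t.length) (0 : Int)
    if 100 < t'.length then t'.take 100 else t')

-- ===== PORT B =====
-- Source B's tuple comparison '(pairs[j][1], pairs[j][0]) < (pairs[m][1], pairs[m][0])'
def lexLtB (a b : Int × Int) : Bool :=
  decide (a.2 < b.2) || (decide (a.2 = b.2) && decide (a.1 < b.1))

-- body of Source B's 'for j in range(1, len(pairs))' minimum-index scan
def selStep (pairs : List (Int × Int)) (m j : Int) : Int :=
  if lexLtB (PySem.List.pyGetD pairs j ((0 : Int), (0 : Int)))
      (PySem.List.pyGetD pairs m ((0 : Int), (0 : Int))) then j else m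

def selMin (pairs : List (Int × Int)) : Int :=
  (PySem.List.pyRange 1 (pairs.length : Int) 1).foldl (selStep pairs) 0

-- Source B's 'while pairs: … v, c = pairs.pop(m); flat += [v, c]' (pop never fails: m is in range)
def selFlat (pairs : List (Int × Int)) : List Int :=
  if pairs = [] then []
  else
    match hp : PySem.List.pop? pairs (selMin pairs) with
    | some pr => [pr.1.1, pr.1.2] ++ selFlat pr.2
    | none => []
termination_by pairs.length
decreasing_by
  have := PySem.List.length_of_pop?_eq_some _ hp
  omega

-- Source B's counting loop 'for v in row: if v != 0: counts[v] = counts.get(v, 0) + 1'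
def countsB (row : List Int) : PySem.Dict Int Int :=
  row.foldl (fun d v => if !(v == 0) then d.insert v (d.getD v 0 + 1) else d) PySem.Dict.empty

def excute_alt (arr : List (List Int)) : List (List Int) :=
  let rows := arr.map (fun row => selFlat (countsB row).items)
  let width := min (PySem.List.maxD (rows.map (fun r => r.length)) (fun x => x) 0) 100
  rows.map (fun r => (r ++ List.replicate (width - r.length) (0 : Int)).take width)

-- ===== PRECONDITION & SPEC =====
def Spec_excute (arr : List (List Int)) (out : List (List Int)) : Prop := out = excute_alt arr
instance (arr : List (List Int)) (out : List (List Int)) : Decidable (Spec_excute arr out) := by unfold Spec_excute; infer_instance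

-- ===== CLAIM (what is proved, stated in full; the proofs are below) =====
def Claim_equal_excute : Prop := ∀ (arr : List (List Int)), Dom_excute arr → Spec_excute arr (excute arr)

-- ===== LEMMAS AND PROOFS =====

-- the lexicographic (count, value) orders on (value, count) pairs
def LexLe (a b : Int × Int) : Prop := a.2 < b.2 ∨ (a.2 = b.2 ∧ a.1 ≤ b.1)
def LexLt (a b : Int × Int) : Prop := a.2 < b.2 ∨ (a.2 = b.2 ∧ a.1 < b.1)
def beforeL (a b : Int × Int) : Bool := decide (a.2 < b.2) || (!decide (b.2 < a.2) && decide (a.1 < b.1))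

lemma sorted2_eq_foldl (xs : List (Int × Int)) :
    PySem.List.sorted2 xs (fun p => p.2) (fun p => p.1) false =
      xs.foldl (fun acc x => PySem.List.insertBy beforeL x acc) [] := rfl

lemma lexle_ne_lt {a b : Int × Int} (hle : LexLe a b) (hne : a ≠ b) : LexLt a b := by
  have h1 : a.2 < b.2 ∨ (a.2 = b.2 ∧ a.1 ≤ b.1) := hle
  have h2 : ¬(a.1 = b.1 ∧ a.2 = b.2) := fun hc => hne (Prod.ext hc.1 hc.2)
  show a.2 < b.2 ∨ (a.2 = b.2 ∧ a.1 < b.1)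
  omega

lemma lexle_refl (a : Int × Int) : LexLe a a := by unfold LexLe; omega

lemma lexle_trans {a b c : Int × Int} (h1 : LexLe a b) (h2 : LexLe b c) : LexLe a c := by
  unfold LexLe at *; omega

lemma lexltB_true {a b : Int × Int} (h : lexLtB a b = true) : LexLe a b := by
  simp only [lexLtB, Bool.or_eq_true, Bool.and_eq_true, decide_eq_true_eq] at h
  unfold LexLe; omega

lemma lexltB_false {a b : Int × Int} (h : lexLtB a b = false) : LexLe b a := by
  simp only [lexLtB, Bool.or_eq_false_iff, Bool.and_eq_false_iff, decide_eq_false_iff_not] at h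
  unfold LexLe
  rcases h with ⟨h1, h2 | h2⟩ <;> omega

lemma insert_pw (x : Int × Int) (ys : List (Int × Int)) (h : ys.Pairwise LexLe) :
    (PySem.List.insertBy beforeL x ys).Pairwise LexLe := by
  induction ys with
  | nil => simp [PySem.List.insertBy]
  | cons y t ih =>
    rcases List.pairwise_cons.mp h with ⟨hy, ht⟩
    by_cases hb : beforeL x y = true
    · simp only [PySem.List.insertBy, hb, if_pos]
      refine List.pairwise_cons.mpr ⟨?_, h⟩
      intro z hz
      have hxy : LexLe x y := by
        simp only [beforeL, Bool.or_eq_true, Bool.and_eq_true, Bool.not_eq_true',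
          decide_eq_true_eq, decide_eq_false_iff_not] at hb
        unfold LexLe; omega
      rcases List.mem_cons.mp hz with rfl | hz
      · exact hxy
      · have := hy z hz; unfold LexLe at *; omega
    · simp only [PySem.List.insertBy, hb, Bool.false_eq_true, if_neg, not_false_iff]
      refine List.pairwise_cons.mpr ⟨?_, ih ht⟩
      intro z hz
      rcases (PySem.List.insertBy_mem_iff beforeL x z t).mp hz with rfl | hz
      · simp only [beforeL, Bool.or_eq_true, Bool.and_eq_true, Bool.not_eq_true',
          decide_eq_true_eq, decide_eq_false_iff_not] at hb
        unfold LexLe; omega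
      · exact hy z hz

lemma foldl_insert_pw (l : List (Int × Int)) :
    ∀ acc : List (Int × Int), acc.Pairwise LexLe →
      (l.foldl (fun acc x => PySem.List.insertBy beforeL x acc) acc).Pairwise LexLe := by
  induction l with
  | nil => intro acc h; simpa using h
  | cons x t ih => intro acc h; exact ih _ (insert_pw x acc h)

-- ---- B-side: the selection loop extracts the unique (count, value)-minimal pair each round ----

lemma sel_inv (pairs : List (Int × Int)) (l : List Int) :
    ∀ m0 : Int, (∀ j ∈ l, 0 ≤ j ∧ j.toNat < pairs.length) →
      0 ≤ m0 → m0.toNat < pairs.length →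
      (0 ≤ l.foldl (selStep pairs) m0 ∧ (l.foldl (selStep pairs) m0).toNat < pairs.length) ∧
      LexLe (PySem.List.pyGetD pairs (l.foldl (selStep pairs) m0) ((0 : Int), (0 : Int)))
        (PySem.List.pyGetD pairs m0 ((0 : Int), (0 : Int))) ∧
      ∀ j ∈ l, LexLe (PySem.List.pyGetD pairs (l.foldl (selStep pairs) m0) ((0 : Int), (0 : Int)))
        (PySem.List.pyGetD pairs j ((0 : Int), (0 : Int))) := by
  induction l with
  | nil =>
    intro m0 _ h0 h1
    exact ⟨⟨h0, h1⟩, lexle_refl _, by simp⟩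
  | cons j t ih =>
    intro m0 hl h0 h1
    have hj := hl j List.mem_cons_self
    have ht : ∀ i ∈ t, 0 ≤ i ∧ i.toNat < pairs.length := fun i hi => hl i (List.mem_cons_of_mem _ hi)
    rw [List.foldl_cons]
    by_cases hb : lexLtB (PySem.List.pyGetD pairs j ((0 : Int), (0 : Int)))
        (PySem.List.pyGetD pairs m0 ((0 : Int), (0 : Int))) = true
    · have hstep : selStep pairs m0 j = j := by
        simp only [selStep]; rw [if_pos hb]
      rw [hstep]
      obtain ⟨hr, hle, hall⟩ := ih j ht hj.1 hj.2
      refine ⟨hr, lexle_trans hle (lexltB_true hb), ?_⟩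
      intro i hi
      rcases List.mem_cons.mp hi with rfl | hi
      · exact hle
      · exact hall i hi
    · have hstep : selStep pairs m0 j = m0 := by
        simp only [selStep]; rw [if_neg hb]
      rw [hstep]
      obtain ⟨hr, hle, hall⟩ := ih m0 ht h0 h1
      refine ⟨hr, hle, ?_⟩
      intro i hi
      rcases List.mem_cons.mp hi with rfl | hi
      · refine lexle_trans hle (lexltB_false ?_)
        simpa using hb
      · exact hall i hi

lemma selMin_spec (pairs : List (Int × Int)) (h : pairs ≠ []) :
    0 ≤ selMin pairs ∧ (selMin pairs).toNat < pairs.length ∧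
      ∀ q ∈ pairs, LexLe (PySem.List.pyGetD pairs (selMin pairs) ((0 : Int), (0 : Int))) q := by
  have hlen : 0 < pairs.length := List.length_pos_of_ne_nil h
  have hl : ∀ j ∈ PySem.List.pyRange 1 (pairs.length : Int) 1, 0 ≤ j ∧ j.toNat < pairs.length := by
    intro j hj
    have := (PySem.List.mem_pyRange_one).mp hj
    omega
  obtain ⟨hr, hle0, hall⟩ := sel_inv pairs (PySem.List.pyRange 1 (pairs.length : Int) 1) 0 hl
    (by omega) (by simpa using hlen)
  refine ⟨hr.1, hr.2, ?_⟩
  intro q hq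
  obtain ⟨k, hk, rfl⟩ := List.mem_iff_getElem.mp hq
  have hget : PySem.List.pyGetD pairs ((k : Nat) : Int) ((0 : Int), (0 : Int)) = pairs[k] := by
    rw [PySem.List.pyGetD_eq_getElem pairs _ (by omega) (by exact_mod_cast hk)]
    simp
  by_cases hk0 : k = 0
  · subst hk0
    rw [← hget]
    exact_mod_cast hle0
  · have hmem : ((k : Nat) : Int) ∈ PySem.List.pyRange 1 (pairs.length : Int) 1 := by
      rw [PySem.List.mem_pyRange_one]
      omega
    rw [← hget]
    exact hall _ hmem

lemma selMin_le (pairs : List (Int × Int)) (h : pairs ≠ [])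
    (hlt : (selMin pairs).toNat < pairs.length) (q : Int × Int) (hq : q ∈ pairs) :
    LexLe (pairs[(selMin pairs).toNat]'hlt) q := by
  obtain ⟨h0, _, hall⟩ := selMin_spec pairs h
  have : PySem.List.pyGetD pairs (selMin pairs) ((0 : Int), (0 : Int)) =
      pairs[(selMin pairs).toNat]'hlt := by
    rw [PySem.List.pyGetD_eq_getElem pairs _ h0 (by omega)]
  rw [← this]
  exact hall q hq

lemma pop_selMin (pairs : List (Int × Int)) (h : pairs ≠ []) :
    PySem.List.pop? pairs (selMin pairs) =
      some (pairs[(selMin pairs).toNat]'((selMin_spec pairs h).2.1),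
        pairs.eraseIdx (selMin pairs).toNat) := by
  obtain ⟨h0, h1, _⟩ := selMin_spec pairs h
  have heq : selMin pairs = (((selMin pairs).toNat : Nat) : Int) := by omega
  conv_lhs => rw [heq]
  exact PySem.List.pop?_natCast pairs _ h1

-- the pair-level mirror of selFlat, used only in the proofs
def selPairs (pairs : List (Int × Int)) : List (Int × Int) :=
  if pairs = [] then []
  else
    match hp : PySem.List.pop? pairs (selMin pairs) with
    | some pr => pr.1 :: selPairs pr.2
    | none => []
termination_by pairs.length
decreasing_by
  have := PySem.List.length_of_pop?_eq_some _ hp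
  omega

lemma selFlat_nil : selFlat [] = [] := by
  rw [selFlat.eq_def]; simp

lemma selPairs_nil : selPairs [] = [] := by
  rw [selPairs.eq_def]; simp

lemma selFlat_cons (pairs : List (Int × Int)) (hp : pairs ≠ [])
    (hM : (selMin pairs).toNat < pairs.length) :
    selFlat pairs = [(pairs[(selMin pairs).toNat]'hM).1, (pairs[(selMin pairs).toNat]'hM).2] ++
      selFlat (pairs.eraseIdx (selMin pairs).toNat) := by
  rw [selFlat.eq_def, if_neg hp]
  split
  · rename_i pr hpr
    rw [pop_selMin pairs hp] at hpr
    cases hpr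
    rfl
  · rename_i hpr
    rw [pop_selMin pairs hp] at hpr
    cases hpr

lemma selPairs_cons (pairs : List (Int × Int)) (hp : pairs ≠ [])
    (hM : (selMin pairs).toNat < pairs.length) :
    selPairs pairs = (pairs[(selMin pairs).toNat]'hM) ::
      selPairs (pairs.eraseIdx (selMin pairs).toNat) := by
  rw [selPairs.eq_def, if_neg hp]
  split
  · rename_i pr hpr
    rw [pop_selMin pairs hp] at hpr
    cases hpr
    rfl
  · rename_i hpr
    rw [pop_selMin pairs hp] at hpr
    cases hpr

lemma selFlat_eq_flatMap : ∀ (n : Nat) (pairs : List (Int × Int)), pairs.length ≤ n →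
    selFlat pairs = (selPairs pairs).flatMap (fun p => [p.1, p.2]) := by
  intro n
  induction n with
  | zero =>
    intro pairs h
    have : pairs = [] := List.eq_nil_of_length_eq_zero (by omega)
    subst this
    rw [selFlat_nil, selPairs_nil]
    simp
  | succ n ih =>
    intro pairs h
    by_cases hp : pairs = []
    · subst hp
      rw [selFlat_nil, selPairs_nil]
      simp
    · have hM := (selMin_spec pairs hp).2.1
      rw [selFlat_cons pairs hp hM, selPairs_cons pairs hp hM]
      have hlen : (pairs.eraseIdx (selMin pairs).toNat).length ≤ n := by
        have := List.length_eraseIdx_of_lt hM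
        omega
      rw [ih _ hlen]
      simp

lemma selPairs_spec : ∀ (n : Nat) (pairs : List (Int × Int)), pairs.length ≤ n → pairs.Nodup →
    (selPairs pairs).Perm pairs ∧ (selPairs pairs).Pairwise LexLt := by
  intro n
  induction n with
  | zero =>
    intro pairs h _
    have : pairs = [] := List.eq_nil_of_length_eq_zero (by omega)
    subst this
    rw [selPairs_nil]
    simp
  | succ n ih =>
    intro pairs h hnd
    by_cases hp : pairs = []
    · subst hp
      rw [selPairs_nil]
      simp
    · have hM := (selMin_spec pairs hp).2.1
      rw [selPairs_cons pairs hp hM]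
      set rest := pairs.eraseIdx (selMin pairs).toNat with hrest
      have hlen : rest.length ≤ n := by
        rw [hrest, List.length_eraseIdx_of_lt hM]
        omega
      have hsub : rest.Sublist pairs := List.eraseIdx_sublist ..
      have hndrest : rest.Nodup := hsub.nodup hnd
      obtain ⟨hperm, hpw⟩ := ih rest hlen hndrest
      have hpermall : (pairs[(selMin pairs).toNat]'hM :: selPairs rest).Perm pairs :=
        (hperm.cons _).trans (List.getElem_cons_eraseIdx_perm hM)
      refine ⟨hpermall, ?_⟩
      refine List.pairwise_cons.mpr ⟨?_, hpw⟩
      intro q hq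
      have hqrest : q ∈ rest := hperm.mem_iff.mp hq
      have hqpairs : q ∈ pairs := hsub.subset hqrest
      have hle := selMin_le pairs hp hM q hqpairs
      have hne : pairs[(selMin pairs).toNat]'hM ≠ q := by
        intro he
        have herase : pairs.erase (pairs[(selMin pairs).toNat]'hM) = rest :=
          List.Nodup.erase_getElem hnd _ hM
        have : q ∈ pairs.erase (pairs[(selMin pairs).toNat]'hM) := herase ▸ hqrest
        rw [← he] at this
        exact (List.Nodup.mem_erase_iff hnd).mp this |>.1 rfl
      exact lexle_ne_lt hle (fun he => hne he)

-- ---- B-side: the counting loop is Counter of the nonzero values ----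

lemma countsB_eq (row : List Int) :
    countsB row = PySem.Dict.counter (row.filter (fun v => !(v == 0))) := by
  unfold countsB
  rw [← List.foldl_filter]
  exact PySem.Dict.foldl_insert_getD_add_one_eq_counter _

lemma mem_items_countsB (row : List Int) (p : Int × Int) :
    p ∈ (countsB row).items ↔ p.1 ∈ row ∧ p.1 ≠ 0 ∧ p.2 = (row.count p.1 : Int) := by
  rw [countsB_eq, PySem.Dict.items_counter, List.mem_map]
  constructor
  · rintro ⟨k, hk, rfl⟩
    have hkf := (PySem.Set.mem_ofList _ k).mp hk
    have hk0 : k ≠ 0 := by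
      have := List.of_mem_filter hkf
      simpa using this
    refine ⟨(List.mem_filter.mp hkf).1, hk0, ?_⟩
    simp only
    rw [List.count_filter (by simpa using hk0)]
  · rintro ⟨h1, h2, h3⟩
    refine ⟨p.1, (PySem.Set.mem_ofList _ p.1).mpr (List.mem_filter.mpr ⟨h1, by simpa using h2⟩), ?_⟩
    refine Prod.ext rfl ?_
    simp only
    rw [List.count_filter (by simpa using h2)]
    exact h3.symm

lemma nodup_items_countsB (row : List Int) : (countsB row).items.Nodup := by
  rw [countsB_eq, PySem.Dict.items_counter]
  exact (PySem.Set.nodup_ofList _).map_on (fun x _ y _ h => congrArg Prod.fst h)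

-- ---- A's per-row emitted list ----

def innerF (l : List (Int × Int)) : List Int :=
  (l.filter (fun c => !(c.1 == 0))).flatMap (fun c => [c.1, c.2])

def Arow (row : List Int) : List Int :=
  innerF (PySem.List.sorted2 (PySem.Dict.counter row).items (fun x => x.2) (fun x => x.1))

lemma row_eq (row : List Int) : selFlat (countsB row).items = Arow row := by
  rw [selFlat_eq_flatMap _ _ le_rfl]
  unfold Arow innerF
  congr 1
  -- A side facts about the sorted full counter
  have hitems : (PySem.Dict.counter row).items =
      (PySem.Set.ofList row).map (fun k => (k, (row.count k : Int))) := PySem.Dict.items_counter row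
  have hnd_items : (PySem.Dict.counter row).items.Nodup := by
    rw [hitems]
    exact (PySem.Set.nodup_ofList row).map_on (fun x _ y _ h => congrArg Prod.fst h)
  have hnd_SA : (PySem.List.sorted2 (PySem.Dict.counter row).items (fun x => x.2) (fun x => x.1)
      false).Nodup := ((PySem.List.sorted2_perm _ _ _ false).nodup_iff).mpr hnd_items
  have hpw_SA : (PySem.List.sorted2 (PySem.Dict.counter row).items (fun x => x.2) (fun x => x.1)
      false).Pairwise LexLe := by
    rw [sorted2_eq_foldl]; exact foldl_insert_pw _ [] (by simp)
  have hmem_SA : ∀ q : Int × Int,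
      q ∈ PySem.List.sorted2 (PySem.Dict.counter row).items (fun x => x.2) (fun x => x.1) false ↔
      q.1 ∈ row ∧ q.2 = (row.count q.1 : Int) := by
    intro q
    rw [(PySem.List.sorted2_perm _ _ _ false).mem_iff, hitems, List.mem_map]
    constructor
    · rintro ⟨k, hk, rfl⟩
      exact ⟨(PySem.Set.mem_ofList row k).mp hk, rfl⟩
    · rintro ⟨h1, h2⟩
      exact ⟨q.1, (PySem.Set.mem_ofList row q.1).mpr h1, Prod.ext rfl h2.symm⟩
  -- B side facts
  obtain ⟨hperm, hpwB⟩ := selPairs_spec _ (countsB row).items le_rfl (nodup_items_countsB row)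
  have hndB : (selPairs (countsB row).items).Nodup :=
    hpwB.imp (fun hlt => by
      intro he
      rw [he] at hlt
      unfold LexLt at hlt
      omega)
  -- the filtered sorted list
  have hpwF : ((PySem.List.sorted2 (PySem.Dict.counter row).items (fun x => x.2) (fun x => x.1)
      false).filter (fun c => !(c.1 == 0))).Pairwise LexLe := hpw_SA.filter _
  have hndF : ((PySem.List.sorted2 (PySem.Dict.counter row).items (fun x => x.2) (fun x => x.1)
      false).filter (fun c => !(c.1 == 0))).Nodup := hnd_SA.filter _
  -- same member sets
  have hpermBF : (selPairs (countsB row).items).Perm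
      ((PySem.List.sorted2 (PySem.Dict.counter row).items (fun x => x.2) (fun x => x.1)
        false).filter (fun c => !(c.1 == 0))) := by
    rw [List.perm_ext_iff_of_nodup hndB hndF]
    intro q
    rw [hperm.mem_iff, mem_items_countsB, List.mem_filter, hmem_SA q]
    constructor
    · rintro ⟨h1, h2, h3⟩
      exact ⟨⟨h1, h3⟩, by simpa using h2⟩
    · rintro ⟨⟨h1, h3⟩, h2⟩
      exact ⟨h1, by simpa using h2, h3⟩
  refine List.Perm.eq_of_pairwise (le := LexLe) ?_ (hpwB.imp ?_) hpwF hpermBF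
  · intro a b _ _ hab hba
    have : a.1 = b.1 ∧ a.2 = b.2 := by unfold LexLe at hab hba; omega
    exact Prod.ext this.1 this.2
  · intro a b hlt
    unfold LexLt at hlt; unfold LexLe; omega

-- ---- A's outer loop ----

lemma inner_fold (l : List (Int × Int)) : ∀ (r : List Int) (m : Nat), r.length ≤ m →
    l.foldl AinnerStep (r, m) = (r ++ innerF l, max m (r ++ innerF l).length) := by
  induction l with
  | nil =>
    intro r m h
    simp only [List.foldl_nil, innerF, List.filter_nil, List.flatMap_nil, List.append_nil]
    exact Prod.ext rfl (by omega)
  | cons c t ih =>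
    intro r m h
    by_cases hc : c.1 = 0
    · have hb : (c.1 == 0) = true := by simp [hc]
      simp only [List.foldl_cons, AinnerStep, hb, if_pos]
      rw [ih r m h]
      have : innerF (c :: t) = innerF t := by simp [innerF, hb]
      rw [this]
    · have hb : (c.1 == 0) = false := by simp [hc]
      simp only [List.foldl_cons, AinnerStep, hb, Bool.false_eq_true, if_neg, not_false_iff]
      rw [ih (r ++ [c.1, c.2]) (max m (r ++ [c.1, c.2]).length)
        (le_max_right _ _)]
      have hF : innerF (c :: t) = [c.1, c.2] ++ innerF t := by
        simp [innerF, hb]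
      rw [hF]
      refine Prod.ext (by simp) ?_
      simp only [List.length_append, List.length_cons, List.length_nil]
      omega

lemma outer_fold (arr : List (List Int)) : ∀ (t0 : List (List Int)) (m0 : Nat),
    arr.foldl AStep (t0, m0) =
      (t0 ++ arr.map Arow, arr.foldl (fun m row => max m (Arow row).length) m0) := by
  induction arr with
  | nil => intro t0 m0; simp
  | cons row t ih =>
    intro t0 m0
    rw [List.foldl_cons, List.foldl_cons]
    have hstep : AStep (t0, m0) row = (t0 ++ [Arow row], max m0 (Arow row).length) := by
      simp only [AStep]
      rw [inner_fold _ [] m0 (by simp)]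
      simp [Arow]
    rw [hstep, ih]
    simp

lemma maxD_eq (xs : List Nat) :
    PySem.List.maxD xs (fun x => x) 0 = xs.foldl (fun m x => max m x) 0 := by
  cases xs with
  | nil => rfl
  | cons x t =>
    simp only [PySem.List.maxD, PySem.List.max?_id_cons, Option.getD_some, List.foldl_cons,
      Nat.zero_max]

lemma pad_eq (t : List Int) (M : Nat) (h : t.length ≤ M) :
    (if 100 < (t ++ List.replicate (M - t.length) (0 : Int)).length then
        (t ++ List.replicate (M - t.length) (0 : Int)).take 100
      else t ++ List.replicate (M - t.length) (0 : Int)) =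
    (t ++ List.replicate (min M 100 - t.length) (0 : Int)).take (min M 100) := by
  have hlen : (t ++ List.replicate (M - t.length) (0 : Int)).length = M := by
    simp [List.length_append, List.length_replicate]; omega
  by_cases h1 : 100 < M
  · rw [if_pos (by rw [hlen]; exact h1)]
    have hm : min M 100 = 100 := by omega
    rw [hm, List.take_append, List.take_append, List.take_replicate, List.take_replicate]
    congr 2
    omega
  · rw [if_neg (by rw [hlen]; exact h1)]
    have hm : min M 100 = M := by omega
    rw [hm]
    exact (List.take_of_length_le (by rw [hlen])).symm

-- ===== VERDICT (by name: the statement is the Claim_ definition above) =====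
theorem excute_spec : Claim_equal_excute := by
  unfold Claim_equal_excute
  intro arr _
  unfold Spec_excute
  show excute arr = excute_alt arr
  simp only [excute, excute_alt]
  rw [outer_fold arr [] 0]
  have hB : arr.map (fun row => selFlat (countsB row).items) = arr.map Arow :=
    List.map_congr_left (fun row _ => row_eq row)
  rw [hB]
  simp only [List.nil_append]
  have hmax : PySem.List.maxD ((arr.map Arow).map (fun r => r.length)) (fun x => x) 0 =
      arr.foldl (fun m row => max m (Arow row).length) 0 := by
    rw [maxD_eq, List.foldl_map, List.foldl_map]
  rw [hmax]
  apply List.map_congr_left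
  intro t ht
  obtain ⟨row, hrow, rfl⟩ := List.mem_map.mp ht
  have hle : (Arow row).length ≤ arr.foldl (fun m row => max m (Arow row).length) 0 :=
    (PySem.List.le_foldl_max_nat arr (fun row => (Arow row).length) 0).2 row hrow
  exact pad_eq (Arow row) _ hle
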